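-- pv_equiv track=rewrite | github.com/salditosr/Pickleball-Round-Robin-Generator | pickleball_round_robin.py | generate_court_games
-- ===== SOURCE A (Python) =====
-- from itertools import combinations
--
-- def generate_court_games(court_players):
--     """Generate all partnership combinations for a court"""
--     games = []
--     all_pairs = list(combinations(court_players, 2))
--
--     used_games = set()
--     for i, pair1 in enumerate(all_pairs):
--         for pair2 in all_pairs[i+1:]:
--             if len(set(pair1 + pair2)) == 4:
--                 game_id = tuple(sorted(pair1 + pair2))
--                 if game_id not in used_games:
--                     games.append({
--                         'team1': list(pair1),
--                         'team2': list(pair2)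
--                     })
--                     used_games.add(game_id)
--
--     return games
-- ===== SOURCE B (Python) =====
-- from itertools import combinations
--
-- def generate_court_games(court_players):
--     """Generate all partnership combinations for a court (one game per 4-player subset)."""
--     games = []
--     seen = set()
--     for a, b, c, d in combinations(court_players, 4):
--         if len({a, b, c, d}) == 4:
--             key = tuple(sorted((a, b, c, d)))
--             if key not in seen:
--                 seen.add(key)
--                 games.append({'team1': [a, b], 'team2': [c, d]})
--     return games
-- ===== Notes on version B (the rewrite author's own statement) =====
-- stated objective: simpler
-- what changed: B enumerates each 4-player combination once with itertools.combinations(court_players, 4) and splits it into teams directly, instead of A's quadratic scan over ordered pairs of 2-player combinations that rediscovers every 4-subset three times and filters the repeats through the seen-set.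
import Mathlib
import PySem

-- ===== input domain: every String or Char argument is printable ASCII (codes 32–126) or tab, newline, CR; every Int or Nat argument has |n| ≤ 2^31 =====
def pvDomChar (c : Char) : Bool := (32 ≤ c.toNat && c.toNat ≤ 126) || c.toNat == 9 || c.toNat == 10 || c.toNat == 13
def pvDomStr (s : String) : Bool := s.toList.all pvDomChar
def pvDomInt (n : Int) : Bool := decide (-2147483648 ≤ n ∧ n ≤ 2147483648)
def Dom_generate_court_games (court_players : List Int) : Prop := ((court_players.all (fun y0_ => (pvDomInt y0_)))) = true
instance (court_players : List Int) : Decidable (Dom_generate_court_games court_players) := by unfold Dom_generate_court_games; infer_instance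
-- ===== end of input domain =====

-- B replaces A's quadratic scan over ordered pairs of 2-combinations by a single pass
-- over the 4-combinations (objective: simpler; same output, including order).

-- ===== PORT A =====
-- state: (games, used_games)
def pvSt : Type := List (List (String × List Int)) × PySem.Set (List Int)

-- the shared loop body of A: guard, game_id, seen-check, append, add
def pvStepA (pair1 pair2 : List Int) (st : pvSt) : pvSt :=
  if (PySem.Set.ofList (pair1 ++ pair2)).length == 4 then
    let gid := PySem.List.sorted (pair1 ++ pair2) (fun x => x) false
    if PySem.Set.contains st.2 gid then st
    else (st.1 ++ [[("team1", pair1), ("team2", pair2)]], PySem.Set.add st.2 gid)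
  else st

def generate_court_games (court_players : List Int) : List (List (String × List Int)) :=
  let all_pairs := PySem.List.combinations court_players 2
  ((PySem.List.enumerate all_pairs).foldl
    (fun st ipair1 =>
      (PySem.List.slice all_pairs (some (ipair1.1 + 1)) none).foldl
        (fun st2 pair2 => pvStepA ipair1.2 pair2 st2) st)
    (([], PySem.Set.empty) : pvSt)).1

-- ===== PORT B =====
-- loop body of B on a 4-combination (a, b, c, d)
def pvStepB (st : pvSt) (combo : List Int) : pvSt :=
  match combo with
  | [a, b, c, d] =>
    if (PySem.Set.ofList [a, b, c, d]).length == 4 then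
      let key := PySem.List.sorted [a, b, c, d] (fun x => x) false
      if PySem.Set.contains st.2 key then st
      else (st.1 ++ [[("team1", [a, b]), ("team2", [c, d])]], PySem.Set.add st.2 key)
    else st
  | _ => st  -- unreachable: every 4-combination has length 4

def generate_court_games_alt (court_players : List Int) : List (List (String × List Int)) :=
  ((PySem.List.combinations court_players 4).foldl pvStepB (([], PySem.Set.empty) : pvSt)).1

-- ===== PRECONDITION & SPEC =====
def Spec_generate_court_games (court_players : List Int) (out : List (List (String × List Int))) : Prop := out = generate_court_games_alt court_players
instance (court_players : List Int) (out : List (List (String × List Int))) : Decidable (Spec_generate_court_games court_players out) := by unfold Spec_generate_court_games; infer_instance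

-- ===== CLAIM (what is proved, stated in full; the proofs are below) =====
def Claim_equal_generate_court_games : Prop := ∀ (court_players : List Int), Dom_generate_court_games court_players → Spec_generate_court_games court_players (generate_court_games court_players)

-- ===== LEMMAS AND PROOFS =====

-- guard and key as functions of the concatenated 4-list
def pvG (xs : List Int) : Bool := (PySem.Set.ofList xs).length == 4
def pvKey (xs : List Int) : List Int := PySem.List.sorted xs (fun x => x) false

lemma pvStepA_eq (p q : List Int) (st : pvSt) :
    pvStepA p q st =
      if pvG (p ++ q) then
        (if PySem.Set.contains st.2 (pvKey (p ++ q)) then st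
         else (st.1 ++ [[("team1", p), ("team2", q)]], PySem.Set.add st.2 (pvKey (p ++ q))))
      else st := rfl

-- A's nested loop, phased per pair1 over the suffix structure
def pvPhasedA (st : pvSt) : List (List Int) → pvSt
  | [] => st
  | p :: P => pvPhasedA (P.foldl (fun s q => pvStepA p q s) st) P

-- normalized combinations unfoldings (numeral-friendly restatements)
lemma pvComb2_cons (x : Int) (xs : List Int) :
    PySem.List.combinations (x :: xs) 2
      = (PySem.List.combinations xs 1).map (x :: ·) ++ PySem.List.combinations xs 2 :=
  PySem.List.combinations_cons_succ (x := x) (xs := xs) (r := 1)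

lemma pvComb3_cons (x : Int) (xs : List Int) :
    PySem.List.combinations (x :: xs) 3
      = (PySem.List.combinations xs 2).map (x :: ·) ++ PySem.List.combinations xs 3 :=
  PySem.List.combinations_cons_succ (x := x) (xs := xs) (r := 2)

lemma pvComb4_cons (x : Int) (xs : List Int) :
    PySem.List.combinations (x :: xs) 4
      = (PySem.List.combinations xs 3).map (x :: ·) ++ PySem.List.combinations xs 4 :=
  PySem.List.combinations_cons_succ (x := x) (xs := xs) (r := 3)

-- guard/key are invariant under permutation of the four players
lemma pvOfList_length_eq_card (xs : List Int) :
    (PySem.Set.ofList xs).length = xs.toFinset.card := by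
  have h1 : (PySem.Set.ofList xs).toFinset = xs.toFinset := by
    ext a; simp [List.mem_toFinset, PySem.Set.mem_ofList]
  rw [← h1]
  exact (List.toFinset_card_of_nodup (PySem.Set.nodup_ofList (xs := xs))).symm

lemma pvG_perm {xs ys : List Int} (h : xs.Perm ys) : pvG xs = pvG ys := by
  have ht : xs.toFinset = ys.toFinset := by ext z; simp [h.mem_iff]
  unfold pvG
  rw [pvOfList_length_eq_card, pvOfList_length_eq_card, ht]

lemma pvKey_perm {xs ys : List Int} (h : xs.Perm ys) : pvKey xs = pvKey ys :=
  PySem.List.sorted_eq_sorted_of_perm xs ys (fun x => x) (fun _ _ h => h) h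

lemma pvCard3 (u v w : Int) : ({u, v, w} : Finset Int).card ≤ 3 := by
  have h1 := Finset.card_insert_le u ({v, w} : Finset Int)
  have h2 := Finset.card_insert_le v ({w} : Finset Int)
  simp only [Finset.card_singleton] at h2
  omega

lemma pvG_false_of_card (xs : List Int) (h : xs.toFinset.card ≤ 3) : pvG xs = false := by
  unfold pvG
  rw [pvOfList_length_eq_card]
  simp only [beq_eq_false_iff_ne, ne_eq]
  omega

lemma pvG_dup (u v w : Int) (xs : List Int) (hsub : ∀ z ∈ xs, z = u ∨ z = v ∨ z = w) :
    pvG xs = false := by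
  apply pvG_false_of_card
  calc xs.toFinset.card ≤ ({u, v, w} : Finset Int).card := by
        apply Finset.card_le_card
        intro z hz
        simp only [List.mem_toFinset] at hz
        simp only [Finset.mem_insert, Finset.mem_singleton]
        exact hsub z hz
    _ ≤ 3 := pvCard3 u v w

-- membership in Set.add, from the definition
lemma pvMem_add_left {s : PySem.Set (List Int)} {k x : List Int} (h : k ∈ s) :
    k ∈ PySem.Set.add s x := by
  unfold PySem.Set.add
  split_ifs <;> simp [h]

lemma pvMem_add_self {s : PySem.Set (List Int)} {x : List Int} :
    x ∈ PySem.Set.add s x := by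
  unfold PySem.Set.add
  split_ifs with hc
  · simpa [PySem.Set.contains_eq_listContains] using hc
  · simp

-- generic fold facts
lemma pv_foldl_fix {β : Type} (Q : List β) (f : pvSt → β → pvSt) (st : pvSt)
    (h : ∀ q ∈ Q, f st q = st) : Q.foldl f st = st := by
  induction Q with
  | nil => rfl
  | cons q Q ih =>
    rw [List.foldl_cons, h q List.mem_cons_self]
    exact ih (fun r hr => h r (List.mem_cons_of_mem _ hr))

lemma pvStepA_seen_mono (p q : List Int) (st : pvSt) : st.2 ⊆ (pvStepA p q st).2 := by
  rw [pvStepA_eq]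
  intro k hk
  split_ifs
  · exact hk
  · exact pvMem_add_left hk
  · exact hk

lemma pv_foldlA_seen_mono (p : List Int) (Q : List (List Int)) :
    ∀ st : pvSt, st.2 ⊆ ((Q.foldl (fun s q => pvStepA p q s) st)).2 := by
  induction Q with
  | nil => intro st; exact fun k hk => hk
  | cons q Q ih =>
    intro st
    rw [List.foldl_cons]
    exact fun k hk => ih _ (pvStepA_seen_mono p q st hk)

lemma pvStepA_of_seen (p q : List Int) (st : pvSt) (h : pvKey (p ++ q) ∈ st.2) :
    pvStepA p q st = st := by
  rw [pvStepA_eq]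
  split_ifs with hg hc
  · rfl
  · exact absurd (show PySem.Set.contains st.2 (pvKey (p ++ q)) = true by
      simp [PySem.Set.contains_eq_listContains]; exact h) hc
  · rfl

lemma pvStepA_of_guard_false (p q : List Int) (st : pvSt) (h : pvG (p ++ q) = false) :
    pvStepA p q st = st := by
  rw [pvStepA_eq, h]
  rfl

lemma pvStepA_key_mem (p q : List Int) (st : pvSt) (hg : pvG (p ++ q) = true) :
    pvKey (p ++ q) ∈ (pvStepA p q st).2 := by
  rw [pvStepA_eq, hg, if_pos rfl]
  split_ifs with hc
  · simp [PySem.Set.contains_eq_listContains] at hc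
    exact hc
  · exact pvMem_add_self

lemma pv_foldlA_key_mem (p : List Int) (Q : List (List Int)) (q : List Int)
    (hq : q ∈ Q) (hg : pvG (p ++ q) = true) :
    ∀ st : pvSt, pvKey (p ++ q) ∈ ((Q.foldl (fun s r => pvStepA p r s) st)).2 := by
  induction Q with
  | nil => cases hq
  | cons r Q ih =>
    intro st
    rw [List.foldl_cons]
    rcases List.mem_cons.mp hq with h | h
    · subst h
      exact pv_foldlA_seen_mono p Q _ (pvStepA_key_mem p q st hg)
    · exact ih h _

-- the per-iteration invariant: every 4-set completed from an already-processed pair1 = (a, d) is seen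
def pvHinv (a : Int) (l : List Int) (done : List Int) (st : pvSt) : Prop :=
  ∀ d ∈ done, ∀ p q : Int, [p, q].Sublist l → pvG [a, d, p, q] = true → pvKey [a, d, p, q] ∈ st.2

-- handy permutations of 4-element lists
lemma pvPerm_move_snd_last (a x d e : Int) : ([a, x, d, e]).Perm [a, d, e, x] := by
  refine List.Perm.cons a ?_
  exact List.perm_append_comm (l₁ := [x]) (l₂ := [d, e])

lemma pvPerm_swap_mid (a x d e : Int) : ([a, x, d, e]).Perm [a, d, x, e] := by
  refine List.Perm.cons a ?_
  exact List.Perm.swap d x [e]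

-- junk pairs (partners positioned at or before x) are all already seen or guard-fail
lemma pvSUBP (a x : Int) (l : List Int) :
    ∀ (ds : List Int) (rest' : List Int) (st : pvSt),
      (ds ++ x :: rest').Sublist l →
      (∀ d ∈ ds, ∀ p q : Int, [p, q].Sublist l → pvG [a, d, p, q] = true → pvKey [a, d, p, q] ∈ st.2) →
      (PySem.List.combinations (ds ++ x :: rest') 2).foldl (fun s q => pvStepA [a, x] q s) st
        = (PySem.List.combinations rest' 2).foldl (fun s q => pvStepA [a, x] q s) st := by
  intro ds
  induction ds with
  | nil =>
    intro rest' st hsub hH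
    rw [List.nil_append, pvComb2_cons, PySem.List.combinations_one, List.foldl_append]
    congr 1
    apply pv_foldl_fix
    intro q hq
    rcases List.mem_map.mp hq with ⟨ys, hys, rfl⟩
    rcases List.mem_map.mp hys with ⟨e, he, rfl⟩
    apply pvStepA_of_guard_false
    exact pvG_dup a x e _ (by intro z hz; simp at hz; tauto)
  | cons d ds' ih =>
    intro rest' st hsub hH
    rw [List.cons_append, pvComb2_cons, PySem.List.combinations_one, List.foldl_append]
    have hfix :
        ((((ds' ++ x :: rest').map fun x => [x]).map (d :: ·)).foldl
            (fun s q => pvStepA [a, x] q s) st) = st := by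
      apply pv_foldl_fix
      intro q hq
      rcases List.mem_map.mp hq with ⟨ys, hys, rfl⟩
      rcases List.mem_map.mp hys with ⟨e, he, rfl⟩
      by_cases hg : pvG ([a, x] ++ [d, e]) = true
      · -- the key is already seen: apply the invariant at the earlier iteration d
        apply pvStepA_of_seen
        rcases List.mem_append.mp he with he' | he''
        · -- e ∈ ds' : partner pair (e, x)
          have hsub2 : ([e, x] : List Int).Sublist l := by
            have h1 : ([e] : List Int).Sublist ds' := List.singleton_sublist.mpr he'
            have h2 : ([x] : List Int).Sublist (x :: rest') :=
              List.singleton_sublist.mpr List.mem_cons_self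
            have h3 : ([e, x] : List Int).Sublist (ds' ++ x :: rest') := List.Sublist.append h1 h2
            exact ((h3.cons d).trans hsub)
          have hperm := pvPerm_move_snd_last a x d e  -- [a,x,d,e] ~ [a,d,e,x]
          have hg' : pvG [a, d, e, x] = true := by
            rw [← pvG_perm hperm]; simpa using hg
          have hkey := hH d List.mem_cons_self e x hsub2 hg'
          have hkeq : pvKey ([a, x] ++ [d, e]) = pvKey [a, d, e, x] := by
            simpa using pvKey_perm hperm
          rw [hkeq]; exact hkey
        · rcases List.mem_cons.mp he'' with he2 | he3
          · -- e = x : guard cannot hold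
            exfalso
            rw [he2] at hg
            have hf : pvG ([a, x] ++ [d, x]) = false :=
              pvG_dup a x d _ (by intro z hz; simp at hz; tauto)
            exact Bool.noConfusion (hf.symm.trans hg)
          · -- e ∈ rest' : partner pair (x, e)
            have hsub2 : ([x, e] : List Int).Sublist l := by
              have h1 : ([x, e] : List Int).Sublist (x :: rest') :=
                List.Sublist.cons₂ x (List.singleton_sublist.mpr he3)
              have h2 : ([x, e] : List Int).Sublist (ds' ++ x :: rest') :=
                List.sublist_append_of_sublist_right h1
              exact ((h2.cons d).trans hsub)
            have hperm := pvPerm_swap_mid a x d e  -- [a,x,d,e] ~ [a,d,x,e]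
            have hg' : pvG [a, d, x, e] = true := by
              rw [← pvG_perm hperm]; simpa using hg
            have hkey := hH d List.mem_cons_self x e hsub2 hg'
            have hkeq : pvKey ([a, x] ++ [d, e]) = pvKey [a, d, x, e] := by
              simpa using pvKey_perm hperm
            rw [hkeq]; exact hkey
      · exact pvStepA_of_guard_false _ _ _ (Bool.eq_false_iff.mpr hg)
    rw [hfix]
    exact ih rest' st ((List.sublist_cons_self _ _).trans hsub)
      (fun d' hd' => hH d' (List.mem_cons_of_mem _ hd'))

lemma pvHinv_step (a x : Int) (l done rest' : List Int) (st : pvSt)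
    (hl : l = done ++ x :: rest') (hinv : pvHinv a l done st) :
    pvHinv a l (done ++ [x])
      ((PySem.List.combinations rest' 2).foldl (fun s q => pvStepA [a, x] q s) st) := by
  intro d hd p q hpq hg
  rcases List.mem_append.mp hd with hdone | hx
  · exact pv_foldlA_seen_mono _ _ _ (hinv d hdone p q hpq hg)
  · have hdx : x = d := (List.mem_singleton.mp hx).symm
    subst hdx
    rw [hl] at hpq
    rcases List.sublist_append_iff.mp hpq with ⟨s1, s2, heq, h1, h2⟩
    rcases s1 with _ | ⟨u, _ | ⟨v, s1'⟩⟩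
    · -- s1 = [] : [p, q] inside x :: rest'
      have hs2 : s2 = [p, q] := by simpa using heq.symm
      subst hs2
      cases h2 with
      | cons _ h =>
        -- [p, q] <+ rest' : this 2-combination is processed in this very fold
        have hmem : ([p, q] : List Int) ∈ PySem.List.combinations rest' 2 :=
          (PySem.List.mem_combinations_iff rest' 2 [p, q]).mpr ⟨h, rfl⟩
        have hg' : pvG ([a, x] ++ [p, q]) = true := by simpa using hg
        have hk := pv_foldlA_key_mem [a, x] (PySem.List.combinations rest' 2) [p, q] hmem hg' st
        simpa using hk
      | cons₂ _ h =>
        -- p = x : guard cannot hold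
        exfalso
        have hf : pvG [a, x, x, q] = false :=
          pvG_dup a x q _ (by intro z hz; simp at hz; tauto)
        exact Bool.noConfusion (hf.symm.trans hg)
    · -- s1 = [u] : p from done, q from x :: rest'
      simp only [List.cons_append, List.nil_append] at heq
      obtain ⟨rfl, hs2⟩ := List.cons.inj heq
      have hs2' : s2 = [q] := hs2.symm
      subst hs2'
      have hpmem : p ∈ done := List.singleton_sublist.mp h1
      have hqmem : q ∈ x :: rest' := List.singleton_sublist.mp h2
      rcases List.mem_cons.mp hqmem with hq1 | hq2
      · -- q = x : guard cannot hold
        exfalso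
        rw [hq1] at hg
        have hf : pvG [a, x, p, x] = false :=
          pvG_dup a x p _ (by intro z hz; simp at hz; tauto)
        exact Bool.noConfusion (hf.symm.trans hg)
      · -- q ∈ rest' : earlier item ((a, p), (x, q))
        have hsub2 : ([x, q] : List Int).Sublist l := by
          rw [hl]
          exact List.sublist_append_of_sublist_right
            (List.Sublist.cons₂ x (List.singleton_sublist.mpr hq2))
        have hperm := pvPerm_swap_mid a x p q  -- [a,x,p,q] ~ [a,p,x,q]
        have hg' : pvG [a, p, x, q] = true := by rw [← pvG_perm hperm]; exact hg
        have hkey := hinv p hpmem x q hsub2 hg'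
        rw [pvKey_perm hperm]
        exact pv_foldlA_seen_mono _ _ _ hkey
    · rcases s1' with _ | ⟨w, s1''⟩
      · -- s1 = [u, v] : both p and q from done; earlier item ((a, p), (q, x))
        simp only [List.cons_append, List.nil_append] at heq
        obtain ⟨rfl, heq2⟩ := List.cons.inj heq
        obtain ⟨rfl, hs2⟩ := List.cons.inj heq2
        have hpmem : p ∈ done := h1.subset List.mem_cons_self
        have hqd : ([q] : List Int).Sublist done :=
          ((List.singleton_sublist.mpr (by simp)).trans h1)
        have hsub2 : ([q, x] : List Int).Sublist l := by
          rw [hl]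
          exact List.Sublist.append hqd (List.singleton_sublist.mpr List.mem_cons_self)
        have hperm := pvPerm_move_snd_last a x p q  -- [a,x,p,q] ~ [a,p,q,x]
        have hg' : pvG [a, p, q, x] = true := by rw [← pvG_perm hperm]; exact hg
        have hkey := hinv p hpmem q x hsub2 hg'
        rw [pvKey_perm hperm]
        exact pv_foldlA_seen_mono _ _ _ hkey
      · exfalso
        have hlen := congrArg List.length heq
        simp [List.length_append] at hlen

lemma pvPHASE (a : Int) (l : List Int) :
    ∀ (rest done : List Int) (st : pvSt), l = done ++ rest → pvHinv a l done st →
      pvPhasedA st (rest.map (fun x => [a, x]) ++ PySem.List.combinations l 2)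
        = pvPhasedA (((PySem.List.combinations rest 3).map (a :: ·)).foldl pvStepB st)
            (PySem.List.combinations l 2) := by
  intro rest
  induction rest with
  | nil =>
    intro done st _ _
    simp [PySem.List.combinations_nil_succ]
  | cons x rest' ih =>
    intro done st hl hinv
    rw [List.map_cons, List.cons_append]
    show pvPhasedA
        ((rest'.map (fun x => [a, x]) ++ PySem.List.combinations l 2).foldl
          (fun s q => pvStepA [a, x] q s) st)
        (rest'.map (fun x => [a, x]) ++ PySem.List.combinations l 2) = _
    rw [List.foldl_append]
    have hfix :
        ((rest'.map fun y => [a, y]).foldl (fun s q => pvStepA [a, x] q s) st) = st := by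
      apply pv_foldl_fix
      intro q hq
      rcases List.mem_map.mp hq with ⟨e, he, rfl⟩
      apply pvStepA_of_guard_false
      exact pvG_dup a x e _ (by intro z hz; simp at hz; tauto)
    rw [hfix]
    have hsubp := pvSUBP a x l done rest' st
      (by rw [hl]) (fun d hd => hinv d hd)
    rw [show PySem.List.combinations l 2 = PySem.List.combinations (done ++ x :: rest') 2
          from by rw [hl], hsubp]
    set st1 := (PySem.List.combinations rest' 2).foldl (fun s q => pvStepA [a, x] q s) st with hst1
    have hinv' : pvHinv a l (done ++ [x]) st1 := pvHinv_step a x l done rest' st hl hinv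
    have hl' : l = (done ++ [x]) ++ rest' := by rw [hl]; simp
    have hih := ih (done ++ [x]) st1 hl' hinv'
    rw [show PySem.List.combinations (done ++ x :: rest') 2 = PySem.List.combinations l 2
          from by rw [hl]]
    rw [hih]
    -- identify the two stepB fold states
    congr 1
    rw [pvComb3_cons, List.map_append, List.foldl_append, List.map_map]
    congr 1
    rw [List.foldl_map]
    rw [hst1]
    apply PySem.List.foldl_congr_mem
    intro acc pq hpq
    rcases (PySem.List.mem_combinations_iff rest' 2 pq).mp hpq with ⟨_, hlen⟩
    match pq, hlen with
    | [p, q], _ => rfl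

lemma pvMAIN : ∀ (l : List Int) (st : pvSt),
    pvPhasedA st (PySem.List.combinations l 2) = (PySem.List.combinations l 4).foldl pvStepB st := by
  intro l
  induction l with
  | nil => intro st; rfl
  | cons a l ih =>
    intro st
    rw [pvComb2_cons, PySem.List.combinations_one]
    have h1 : ((l.map fun x => [x]).map (a :: ·)) = l.map fun x : Int => [a, x] := by
      rw [List.map_map]; rfl
    rw [h1]
    rw [pvPHASE a l l [] st rfl (by intro d hd; cases hd)]
    rw [ih]
    rw [pvComb4_cons, List.foldl_append]

lemma pvEnumFold (FULL : List (List Int)) :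
    ∀ (P : List (List Int)) (k : Nat) (st : pvSt), FULL.drop k = P →
      (PySem.List.enumerate P (k : Int)).foldl
          (fun st ip =>
            (PySem.List.slice FULL (some (ip.1 + 1)) none).foldl
              (fun s q => pvStepA ip.2 q s) st) st
        = pvPhasedA st P := by
  intro P
  induction P with
  | nil => intro k st _; rfl
  | cons p P ih =>
    intro k st hk
    rw [PySem.List.enumerate_cons, List.foldl_cons]
    have hdrop : FULL.drop (k + 1) = P := by
      have := congrArg (List.drop 1) hk
      simpa [List.drop_drop, Nat.add_comm] using this
    have hslice : PySem.List.slice FULL (some ((k : Int) + 1)) none = P := by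
      rw [show ((k : Int) + 1) = ((k + 1 : Nat) : Int) from by push_cast; ring]
      rw [PySem.List.slice_from_natCast]
      exact hdrop
    rw [hslice]
    have hih := ih (k + 1) ((P.foldl (fun s q => pvStepA p q s) st)) hdrop
    rw [show ((k : Int) + 1) = ((k + 1 : Nat) : Int) from by push_cast; ring]
    rw [hih]
    rfl

lemma pvPortA (cp : List Int) :
    generate_court_games cp
      = (pvPhasedA (([], PySem.Set.empty) : pvSt) (PySem.List.combinations cp 2)).1 := by
  have h := pvEnumFold (PySem.List.combinations cp 2) (PySem.List.combinations cp 2) 0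
      (([], PySem.Set.empty) : pvSt) rfl
  simp only [Nat.cast_zero] at h
  exact congrArg Prod.fst h

-- ===== VERDICT (by name: the statement is the Claim_ definition above) =====
theorem generate_court_games_spec : Claim_equal_generate_court_games := by
  intro cp _
  show generate_court_games cp = generate_court_games_alt cp
  rw [pvPortA, pvMAIN]
  rfl
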